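-- pv_equiv track=rewrite | github.com/ksu-is/texas-holdem | TexasHoldem.py | order_card_values
-- ===== SOURCE A (Python) =====
-- def order_card_values(player1_hand, value_list):
-- 	ordered_hand = []
-- 	for value in value_list:
-- 		for card in player1_hand:
-- 			try:
-- 				if int(card[0]) == value:
-- 					ordered_hand.append(card)
-- 			except ValueError:
-- 				if card[0] == value:
-- 					ordered_hand.append(card)
-- 	return ordered_hand
-- ===== SOURCE B (Python) =====
-- def order_card_values(player1_hand, value_list):
--     # One pass builds an index: digit-ranked cards bucketed by their numeric rank
--     # (int(card[0]) only succeeds for a digit first char; a non-digit first char can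
--     # never equal an int value, so those cards are never emitted).
--     index = {}
--     for card in player1_hand:
--         try:
--             key = int(card[:1])
--         except ValueError:
--             continue
--         index.setdefault(key, []).append(card)
--     ordered_hand = []
--     for value in value_list:
--         ordered_hand.extend(index.get(value, []))
--     return ordered_hand
-- ===== Notes on version B (the rewrite author's own statement) =====
-- stated objective: faster
-- what changed: Instead of rescanning the whole hand for every value (nested loops), B makes one pass over the hand building a dict from numeric rank to the bucket of cards in hand order, then emits buckets in a single pass over value_list; cards whose first char is not a digit can never equal an int value, so they are indexed away.
import Mathlib
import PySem

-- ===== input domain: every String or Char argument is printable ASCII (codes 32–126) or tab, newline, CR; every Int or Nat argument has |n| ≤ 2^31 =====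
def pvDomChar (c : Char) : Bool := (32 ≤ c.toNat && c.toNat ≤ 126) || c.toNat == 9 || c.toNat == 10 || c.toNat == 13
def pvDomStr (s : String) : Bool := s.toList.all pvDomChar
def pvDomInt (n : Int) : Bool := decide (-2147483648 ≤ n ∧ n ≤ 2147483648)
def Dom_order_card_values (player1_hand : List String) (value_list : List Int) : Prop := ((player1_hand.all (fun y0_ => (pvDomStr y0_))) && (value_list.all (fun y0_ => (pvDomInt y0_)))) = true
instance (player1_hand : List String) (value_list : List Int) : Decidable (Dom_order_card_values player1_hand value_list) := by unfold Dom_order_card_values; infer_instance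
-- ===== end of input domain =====

-- B replaces A's rescan of the whole hand for every value by one indexing pass over the
-- hand (a dict from numeric rank to the bucket of cards, in hand order) and a single
-- value-ordered pass of bucket lookups; measurably faster on large inputs.

-- ===== PORT A =====
def order_card_values (player1_hand : List String) (value_list : List Int) : List String :=
  value_list.foldl (fun ordered_hand value =>
    player1_hand.foldl (fun ordered_hand card =>
      match PySem.List.pyGet? card.toList 0 with
      | none => ordered_hand   -- card[0] raises IndexError (uncaught); excluded by Pre_
      | some c =>
        match PySem.Int.ofChars? [c] with
        | some n => if n == value then ordered_hand ++ [card] else ordered_hand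
        | none => ordered_hand  -- except ValueError: card[0] == value is str == int, always False
      ) ordered_hand) []

-- ===== PORT B =====
-- int(card[:1]): none = ValueError (non-digit first char, or empty card)
def pvKey? (card : String) : Option Int :=
  PySem.Int.ofChars? (PySem.List.slice card.toList none (some 1))

def order_card_values_alt (player1_hand : List String) (value_list : List Int) : List String :=
  let index : PySem.Dict Int (List String) :=
    player1_hand.foldl (fun index card =>
      match pvKey? card with
      | none => index                                     -- continue
      | some key => index.modify key [] (· ++ [card]))    -- setdefault(key, []).append(card)
      PySem.Dict.empty
  value_list.foldl (fun ordered_hand value =>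
    ordered_hand ++ index.getD value []) []

-- ===== PRECONDITION & SPEC =====
-- Pre_ excludes exactly the inputs on which Python A raises IndexError: a nonempty
-- value_list together with an empty-string card (card[0] is uncaught there).
def Pre_order_card_values (player1_hand : List String) (value_list : List Int) : Prop :=
  value_list = [] ∨ ∀ card ∈ player1_hand, card ≠ ""
instance (player1_hand : List String) (value_list : List Int) : Decidable (Pre_order_card_values player1_hand value_list) := by unfold Pre_order_card_values; infer_instance

def pvWitness_order_card_values : List String × List Int := (["2h", "Kd", "10s"], [10, 2, 13])

def Spec_order_card_values (player1_hand : List String) (value_list : List Int) (out : List String) : Prop := out = order_card_values_alt player1_hand value_list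
instance (player1_hand : List String) (value_list : List Int) (out : List String) : Decidable (Spec_order_card_values player1_hand value_list out) := by unfold Spec_order_card_values; infer_instance

-- ===== CLAIM (what is proved, stated in full; the proofs are below) =====
def Claim_equal_order_card_values : Prop := ∀ (player1_hand : List String) (value_list : List Int), Dom_order_card_values player1_hand value_list → Pre_order_card_values player1_hand value_list → Spec_order_card_values player1_hand value_list (order_card_values player1_hand value_list)

-- ===== LEMMAS AND PROOFS =====

-- A's inner scan appends exactly the cards whose first char parses to `value`, in hand order.
theorem pvInnerA (hand : List String) (value : Int) (acc : List String) :
    hand.foldl (fun ordered_hand card =>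
      match PySem.List.pyGet? card.toList 0 with
      | none => ordered_hand
      | some c =>
        match PySem.Int.ofChars? [c] with
        | some n => if n == value then ordered_hand ++ [card] else ordered_hand
        | none => ordered_hand) acc
    = acc ++ hand.filter (fun card => pvKey? card == some value) := by
  have hstep : ∀ (acc : List String) (card : String),
      (match PySem.List.pyGet? card.toList 0 with
      | none => acc
      | some c =>
        match PySem.Int.ofChars? [c] with
        | some n => if n == value then acc ++ [card] else acc
        | none => acc)
      = if pvKey? card == some value then acc ++ [card] else acc := by
    intro acc card
    unfold pvKey?
    cases hl : card.toList with
    | nil =>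
      simp [PySem.List.pyGet?, PySem.List.pyIdx?, PySem.List.slice,
            show PySem.Int.ofChars? ([] : List Char) = none from rfl]
    | cons c t =>
      have h01 : PySem.List.slice (c :: t) none (some 1) = [c] := by
        have := PySem.List.slice_to_natCast (xs := c :: t) (b := 1)
        simpa using this
      rw [PySem.List.pyGet?_zero_cons, h01]
      cases h : PySem.Int.ofChars? [c] with
      | none => simp [h]
      | some n => simp [h]
  calc hand.foldl _ acc
      = hand.foldl (fun acc card => if pvKey? card == some value then acc ++ [card] else acc) acc := by
        apply PySem.List.foldl_congr_mem
        intro a card _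
        exact hstep a card
    _ = acc ++ hand.filter (fun card => pvKey? card == some value) :=
        PySem.List.foldl_append_if_eq_filter _ _ _

-- B's index bucket at `v` is exactly that filter.
theorem pvIndexGetD (hand : List String) (d : PySem.Dict Int (List String)) (v : Int) :
    (hand.foldl (fun index card =>
      match pvKey? card with
      | none => index
      | some key => index.modify key [] (· ++ [card])) d).getD v []
    = d.getD v [] ++ hand.filter (fun card => pvKey? card == some v) := by
  induction hand generalizing d with
  | nil => simp
  | cons card t ih =>
    cases h : pvKey? card with
    | none => simp [h, ih]
    | some k =>
      simp only [List.foldl_cons, h, List.filter_cons]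
      rw [ih]
      rw [PySem.Dict.getD_modify]
      by_cases hv : v = k
      · subst hv; simp
      · simp [hv, Ne.symm hv]

theorem order_card_values_eq (hand : List String) (vl : List Int) :
    order_card_values hand vl = order_card_values_alt hand vl := by
  unfold order_card_values order_card_values_alt
  simp only [pvInnerA, pvIndexGetD, PySem.Dict.getD_empty, List.nil_append]

-- ===== VERDICT (by name: the statement is the Claim_ definition above) =====
theorem order_card_values_spec : Claim_equal_order_card_values := by
  intro hand vl _ _
  unfold Spec_order_card_values
  exact order_card_values_eq hand vl
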